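-- pv_equiv track=rewrite | github.com/Ibozz91/repl-backup | repls/main (34).py | howmanyways
-- ===== SOURCE A (Python) =====
-- def howmanyways(total,valid,things,last=-1):
--   if last == -1:
--     last = max(valid)
--   if total==0:
--     return 1
--   if (total,last) in things:
--     return things[(total,last)]
--   howmanyways(total-1,valid,things,last)
--   h=0
--   for i in valid:
--     if i<=total and i<=last:
--       h+=howmanyways(total-i,valid,things,i)
--   things[(total,last)]=h
--   return h
-- ===== SOURCE B (Python) =====
-- def howmanyways(total, valid, things, last=-1):
--     if last == -1:
--         last = max(valid)
--     if total == 0: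
--         return 1
--     counts = {}
--     for c in valid:
--         counts[c] = counts.get(c, 0) + 1
--     dp = [1] + [0] * total
--     for c, m in counts.items():
--         if c <= last:
--             for t in range(c, total + 1):
--                 dp[t] += m * dp[t - c]
--     return dp[total]
-- ===== Notes on version B (the rewrite author's own statement) =====
-- stated objective: faster
-- what changed: Replaces the memoized top-down recursion on (total,last) (with its mutated memo dict and discarded helper call) by a bottom-up 1-D coin-DP: tally valid into a multiplicity counter, then for each distinct coin c <= last do dp[t] += m*dp[t-c] over t, returning dp[total].
-- outside the precondition, e.g. on howmanyways(2, [1], {(1, 1): 5}, -1): A returns 5, B returns 1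
import Mathlib
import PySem

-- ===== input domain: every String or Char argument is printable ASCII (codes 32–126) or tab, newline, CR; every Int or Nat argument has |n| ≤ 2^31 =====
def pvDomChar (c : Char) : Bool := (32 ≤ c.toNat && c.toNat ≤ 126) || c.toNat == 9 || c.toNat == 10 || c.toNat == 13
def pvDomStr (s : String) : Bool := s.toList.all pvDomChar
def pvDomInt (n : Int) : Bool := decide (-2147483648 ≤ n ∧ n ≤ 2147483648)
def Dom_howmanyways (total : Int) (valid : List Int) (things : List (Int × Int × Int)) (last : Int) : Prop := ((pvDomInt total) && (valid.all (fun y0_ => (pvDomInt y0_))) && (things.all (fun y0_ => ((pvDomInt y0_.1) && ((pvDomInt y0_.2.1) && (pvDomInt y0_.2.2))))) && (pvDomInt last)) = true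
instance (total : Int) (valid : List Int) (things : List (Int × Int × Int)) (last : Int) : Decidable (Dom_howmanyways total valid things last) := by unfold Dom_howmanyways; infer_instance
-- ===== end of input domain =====

-- B replaces A's memoized top-down recursion on (total,last) by a bottom-up 1-D coin DP over a
-- multiplicity counter of `valid`; return values agree on Pre_ (A also mutates the passed-in memo
-- dict `things`, which B leaves untouched: the equivalence proved here is about the return value only).

-- ===== PORT A =====
-- `last = max(valid)` resolution shared by both ports (Python reassigns the local `last`).
-- `.getD 0` stands for the ValueError `max([])` raises; Pre_ excludes that input.
def pvResolve (valid : List Int) (last : Int) : Int :=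
  if last = -1 then (PySem.List.max? valid (fun x => x)).getD 0 else last

-- A's recursion, fuel-indexed (Python recursion depth; on Pre_ the fuel `total+1` used below is
-- never exhausted — outside Pre_ Python A itself hits RecursionError).  The memo dict `things`
-- is threaded through exactly as Python mutates it; keys are the (total,last) pairs.
def pvAFuel (valid : List Int) : Nat → Int → PySem.Dict (Int × Int) Int → Int → Int × PySem.Dict (Int × Int) Int
  | 0, _, d, _ => (0, d)
  | f+1, total, d, last0 =>
    let last := pvResolve valid last0
    if total = 0 then (1, d)
    else
      match d.get? (total, last) with
      | some v => (v, d)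
      | none =>
        let d1 := (pvAFuel valid f (total - 1) d last).2      -- value discarded, mutation kept
        let s := valid.foldl
          (fun (acc : Int × PySem.Dict (Int × Int) Int) i =>
            if i ≤ total ∧ i ≤ last then
              let r := pvAFuel valid f (total - i) acc.2 i
              (acc.1 + r.1, r.2)
            else acc) (0, d1)
        (s.1, s.2.insert (total, last) s.1)

def howmanyways (total : Int) (valid : List Int) (things : List (Int × Int × Int)) (last : Int) : Int :=
  -- the Python dict argument: triples (t, l, v) become key (t,l) ↦ v, later duplicates overwriting
  let d0 : PySem.Dict (Int × Int) Int :=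
    things.foldl (fun d e => d.insert (e.1, e.2.1) e.2.2) PySem.Dict.empty
  (pvAFuel valid (total.toNat + 1) total d0 last).1

-- ===== PORT B =====
-- Source B: resolve `last`, tally `valid` into a counter, then 1-D coin DP dp[t] += m * dp[t-c].
-- pyGetD/pySetD are Python's dp[t] accesses; on Pre_ every index is in range.
def howmanyways_alt (total : Int) (valid : List Int) (things : List (Int × Int × Int)) (last0 : Int) : Int :=
  let last := pvResolve valid last0
  if total = 0 then 1
  else
    let counts : PySem.Dict Int Int :=
      valid.foldl (fun d c => d.insert c (d.getD c 0 + 1)) PySem.Dict.empty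
    let dp0 : List Int := 1 :: List.replicate total.toNat 0    -- [1] + [0]*total
    let dp := counts.items.foldl
      (fun dp p =>
        if p.1 ≤ last then
          (PySem.List.pyRange p.1 (total + 1)).foldl
            (fun dp t =>
              PySem.List.pySetD dp t
                (PySem.List.pyGetD dp t 0 + p.2 * PySem.List.pyGetD dp (t - p.1) 0))
            dp
        else dp) dp0
    PySem.List.pyGetD dp total 0

-- ===== PRECONDITION & SPEC =====
-- Pre_ excludes (a) inputs on which Python A raises: negative total and a usable non-positive part
-- (unbounded recursion, RecursionError) and last = -1 with empty valid (ValueError from max([])),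
-- and (b) memo dicts pre-seeded with a key A's recursion can reach (total-component in [1, total]
-- and last-component equal to the resolved `last` or a usable element of `valid`): there A just
-- returns whatever value the caller seeded, while B ignores the memo and returns the actual count.
def Pre_howmanyways (total : Int) (valid : List Int) (things : List (Int × Int × Int)) (last : Int) : Prop :=
  0 ≤ total ∧ (last = -1 → valid ≠ []) ∧
  (1 ≤ total →
    (∀ i ∈ valid, 1 ≤ i ∨ pvResolve valid last < i) ∧
    (∀ e ∈ things, 1 ≤ e.1 → e.1 ≤ total →
      e.2.1 ≠ pvResolve valid last ∧ (e.2.1 ∈ valid → pvResolve valid last < e.2.1)))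
instance (total : Int) (valid : List Int) (things : List (Int × Int × Int)) (last : Int) : Decidable (Pre_howmanyways total valid things last) := by unfold Pre_howmanyways; infer_instance

def pvWitness_howmanyways : Int × List Int × (List (Int × Int × Int)) × Int := (6, [1, 2, 3], [(0, 1, 7)], -1)

def Spec_howmanyways (total : Int) (valid : List Int) (things : List (Int × Int × Int)) (last : Int) (out : Int) : Prop := out = howmanyways_alt total valid things last
instance (total : Int) (valid : List Int) (things : List (Int × Int × Int)) (last : Int) (out : Int) : Decidable (Spec_howmanyways total valid things last out) := by unfold Spec_howmanyways; infer_instance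

-- ===== CLAIM (what is proved, stated in full; the proofs are below) =====
def Claim_equal_howmanyways : Prop := ∀ (total : Int) (valid : List Int) (things : List (Int × Int × Int)) (last : Int), Dom_howmanyways total valid things last → Pre_howmanyways total valid things last → Spec_howmanyways total valid things last (howmanyways total valid things last)

-- ===== LEMMAS AND PROOFS =====

-- every part that may ever be selected is positive
def pvLastOK (valid : List Int) (L : Int) : Prop := ∀ i ∈ valid, i ≤ L → 1 ≤ i

-- the pure mathematical recursion A computes: W t L = partitions of t into a non-increasing
-- sequence of elements of `valid` (counted with multiplicity), first part ≤ L
def pvWf (valid : List Int) : Nat → Nat → Int → Int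
  | 0, _, _ => 0
  | f+1, t, L =>
    if t = 0 then 1
    else valid.foldl
      (fun h i => if 1 ≤ i ∧ i ≤ (t : Int) ∧ i ≤ L then h + pvWf valid f (t - i.toNat) i else h) 0

def pvW (valid : List Int) (t : Nat) (L : Int) : Int := pvWf valid (t+1) t L

-- weighted unbounded-knapsack count over an explicit (coin, multiplicity) list
def pvM : List (Int × Int) → Nat → Int
  | [], t => if t = 0 then 1 else 0
  | (c, m) :: rest, t =>
    pvM rest t + (if h : 1 ≤ c ∧ c.toNat ≤ t then m * pvM ((c, m) :: rest) (t - c.toNat) else 0)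
  termination_by cs t => (t, cs.length)
  decreasing_by
  · exact Prod.Lex.right _ (by simp)
  · exact Prod.Lex.left _ _ (by omega)

-- counter items of `valid`, sorted by descending coin value (proof-side normal form)
def pvCoins (valid : List Int) : List (Int × Int) :=
  ((PySem.Dict.counter valid).items).mergeSort (fun a b => b.1 ≤ a.1)

theorem pvWf_irrel (valid : List Int) : ∀ (t : Nat) (f₁ f₂ : Nat) (L : Int), t < f₁ → t < f₂ →
    pvWf valid f₁ t L = pvWf valid f₂ t L := by
  intro t
  induction t using Nat.strong_induction_on with
  | _ t IH =>
    intro f₁ f₂ L h1 h2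
    match f₁, f₂ with
    | g₁+1, g₂+1 =>
      simp only [pvWf]
      by_cases ht : t = 0
      · simp [ht]
      · simp only [if_neg ht]
        apply PySem.List.foldl_congr_mem
        intro acc x _
        by_cases hc : 1 ≤ x ∧ x ≤ (t : Int) ∧ x ≤ L
        · simp only [if_pos hc]
          congr 1
          exact IH (t - x.toNat) (by omega) g₁ g₂ x (by omega) (by omega)
        · simp [if_neg hc]

theorem pvW_succ (valid : List Int) (t : Nat) (L : Int) (ht : t ≠ 0) :
    pvW valid t L = valid.foldl
      (fun h i => if 1 ≤ i ∧ i ≤ (t : Int) ∧ i ≤ L then h + pvW valid (t - i.toNat) i else h) 0 := by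
  show pvWf valid (t+1) t L = _
  simp only [pvWf, if_neg ht]
  apply PySem.List.foldl_congr_mem
  intro acc x _
  by_cases hc : 1 ≤ x ∧ x ≤ (t : Int) ∧ x ≤ L
  · simp only [if_pos hc]
    congr 1
    exact pvWf_irrel valid (t - x.toNat) t ((t - x.toNat) + 1) x (by omega) (by omega)
  · simp [if_neg hc]

theorem pv_foldl_if_add {α : Type} (P : α → Prop) [DecidablePred P] (g : α → Int) :
    ∀ (l : List α) (init : Int),
      l.foldl (fun h i => if P i then h + g i else h) init
        = init + (l.map (fun i => if P i then g i else 0)).sum := by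
  intro l
  induction l with
  | nil => simp
  | cons x l IH =>
    intro init
    simp only [List.foldl_cons, List.map_cons, List.sum_cons, IH]
    by_cases hx : P x
    · simp [hx, add_assoc]
    · simp [hx]

theorem pv_sum_over_nodup (F : Int → Int) :
    ∀ (d l : List Int), d.Nodup → (∀ i ∈ l, i ∈ d) →
      (d.map (fun c => (l.count c : Int) * F c)).sum = (l.map F).sum := by
  intro d
  induction d with
  | nil =>
    intro l _ hsub
    have hl : l = [] := List.eq_nil_iff_forall_not_mem.mpr (fun x hx => by simpa using hsub x hx)
    subst hl; simp
  | cons c d IH =>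
    intro l hnd hsub
    have hcd : c ∉ d := (List.nodup_cons.mp hnd).1
    have hnd' : d.Nodup := (List.nodup_cons.mp hnd).2
    have hsplit := List.sum_map_filter_add_sum_map_filter_not (fun x => x = c) F l
    have hfe : l.filter (fun x => decide (x = c)) = List.replicate (l.count c) c :=
      List.filter_eq c
    rw [List.map_cons, List.sum_cons, ← hsplit, hfe, List.map_replicate, List.sum_replicate]
    have hcounts : (d.map (fun c' => (l.count c' : Int) * F c')).sum
        = (d.map (fun c' => ((l.filter (fun x => decide ¬ (x = c))).count c' : Int) * F c')).sum := by
      congr 1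
      apply List.map_congr_left
      intro x hx
      have hxc : x ≠ c := fun e => hcd (e ▸ hx)
      rw [List.count_filter (by simpa using hxc)]
    rw [hcounts, IH (l.filter (fun x => decide ¬ (x = c))) hnd' ?hsub2]
    case hsub2 =>
      intro i hi
      have h1 : i ∈ l := List.mem_of_mem_filter hi
      have h2 : ¬ (i = c) := by simpa using List.of_mem_filter hi
      have := hsub i h1
      simp only [List.mem_cons] at this
      tauto
    simp

theorem pvM_zero : ∀ (es : List (Int × Int)), pvM es 0 = 1 := by
  intro es
  induction es with
  | nil => simp [pvM]
  | cons p rest IH =>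
    obtain ⟨c, m⟩ := p
    rw [pvM, dif_neg (by omega)]
    simp [IH]

theorem pvM_cons (c m : Int) (rest : List (Int × Int)) (t : Nat) :
    pvM ((c, m) :: rest) t
      = pvM rest t + (if 1 ≤ c ∧ c.toNat ≤ t then m * pvM ((c, m) :: rest) (t - c.toNat) else 0) := by
  rw [pvM]
  by_cases h : 1 ≤ c ∧ c.toNat ≤ t
  · rw [dif_pos h, if_pos h]
  · rw [dif_neg h, if_neg h]

theorem pvM_drop {c : Int} (m : Int) (l : List (Int × Int)) (t : Nat) (hc : ¬ 1 ≤ c) :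
    pvM ((c, m) :: l) t = pvM l t := by
  rw [pvM_cons, if_neg (by tauto)]
  simp

theorem pvM_congr (p : Int × Int) (l1 l2 : List (Int × Int))
    (h : ∀ s, pvM l1 s = pvM l2 s) : ∀ t, pvM (p :: l1) t = pvM (p :: l2) t := by
  intro t
  induction t using Nat.strong_induction_on with
  | _ t IH =>
    obtain ⟨c, m⟩ := p
    rw [pvM_cons c m l1 t, pvM_cons c m l2 t, h t]
    by_cases hc : 1 ≤ c ∧ c.toNat ≤ t
    · simp only [if_pos hc]
      rw [IH (t - c.toNat) (by omega)]
    · simp only [if_neg hc]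

theorem pvM_swap (a b : Int × Int) (l : List (Int × Int)) :
    ∀ t, pvM (a :: b :: l) t = pvM (b :: a :: l) t := by
  obtain ⟨ca, ma⟩ := a
  obtain ⟨cb, mb⟩ := b
  intro t
  induction t using Nat.strong_induction_on with
  | _ t IH =>
    by_cases ha : 1 ≤ ca
    · by_cases hb : 1 ≤ cb
      · -- both coins positive: expand both sides into the symmetric four-term normal form
        have hnorm : ∀ (cx mx cy my : Int), 1 ≤ cx → 1 ≤ cy →
            (∀ s, s < t → pvM ((cx,mx)::(cy,my)::l) s = pvM ((cy,my)::(cx,mx)::l) s) →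
            pvM ((cx,mx)::(cy,my)::l) t = pvM l t
              + (if 1 ≤ cy ∧ cy.toNat ≤ t then my * pvM ((cy,my)::l) (t - cy.toNat) else 0)
              + (if 1 ≤ cx ∧ cx.toNat ≤ t then mx * pvM ((cx,mx)::l) (t - cx.toNat) else 0)
              + (if cx.toNat + cy.toNat ≤ t then
                   mx * my * pvM ((cy,my)::(cx,mx)::l) (t - cx.toNat - cy.toNat) else 0) := by
          intro cx mx cy my hx hy hsw
          rw [pvM_cons cx mx ((cy,my)::l) t, pvM_cons cy my l t]
          by_cases hcx : 1 ≤ cx ∧ cx.toNat ≤ t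
          · simp only [if_pos hcx]
            rw [hsw (t - cx.toNat) (by omega),
              pvM_cons cy my ((cx,mx)::l) (t - cx.toNat)]
            rw [mul_add, mul_ite, mul_zero, ← mul_assoc]
            rw [if_congr (show (1 ≤ cy ∧ cy.toNat ≤ t - cx.toNat) ↔
                  (cx.toNat + cy.toNat ≤ t) by omega) rfl rfl]
            ring
          · simp only [if_neg hcx]
            rw [if_neg (show ¬ (cx.toNat + cy.toNat ≤ t) by omega)]
            ring
        have Hab := hnorm ca ma cb mb ha hb (fun s hs => IH s hs)
        have Hba := hnorm cb mb ca ma hb ha (fun s hs => (IH s hs).symm)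
        rw [Hab, Hba]
        by_cases hg : ca.toNat + cb.toNat ≤ t
        · rw [if_pos hg, if_pos (show cb.toNat + ca.toNat ≤ t by omega)]
          rw [IH (t - cb.toNat - ca.toNat) (by omega)]
          rw [show t - cb.toNat - ca.toNat = t - ca.toNat - cb.toNat by omega]
          ring
        · rw [if_neg hg, if_neg (show ¬ (cb.toNat + ca.toNat ≤ t) by omega)]
          ring
      · have db : ∀ s, pvM ((cb,mb)::l) s = pvM l s := fun s => pvM_drop mb l s hb
        calc pvM ((ca,ma)::(cb,mb)::l) t = pvM ((ca,ma)::l) t := pvM_congr (ca,ma) _ _ db t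
          _ = pvM ((cb,mb)::(ca,ma)::l) t := (pvM_drop mb ((ca,ma)::l) t hb).symm
    · have da : ∀ s, pvM ((ca,ma)::l) s = pvM l s := fun s => pvM_drop ma l s ha
      calc pvM ((ca,ma)::(cb,mb)::l) t = pvM ((cb,mb)::l) t := pvM_drop ma _ t ha
        _ = pvM ((cb,mb)::(ca,ma)::l) t := (pvM_congr (cb,mb) _ _ da t).symm

theorem pvM_perm {l1 l2 : List (Int × Int)} (h : l1.Perm l2) : ∀ t, pvM l1 t = pvM l2 t := by
  induction h with
  | nil => intro t; rfl
  | cons x _ IH => exact fun t => pvM_congr x _ _ IH t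
  | swap x y l => exact pvM_swap y x l
  | trans _ _ IH1 IH2 => exact fun t => (IH1 t).trans (IH2 t)

-- membership in pvCoins
theorem pvCoins_mem {valid : List Int} {p : Int × Int} (h : p ∈ pvCoins valid) :
    p.1 ∈ valid ∧ p.2 = (valid.count p.1 : Int) := by
  have h2 : p ∈ (PySem.Dict.counter valid).items := (List.mergeSort_perm _ _).subset h
  rw [PySem.Dict.items_counter] at h2
  obtain ⟨k, hk, rfl⟩ := List.mem_map.mp h2
  exact ⟨(PySem.Set.mem_ofList valid k).mp hk, rfl⟩

theorem pvCoins_perm (valid : List Int) :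
    (pvCoins valid).Perm ((PySem.Dict.counter valid).items) := by
  exact List.mergeSort_perm _ _

theorem pvCoins_sorted (valid : List Int) :
    (pvCoins valid).Pairwise (fun a b => b.1 < a.1) := by
  have hle := List.pairwise_mergeSort
    (le := fun a b : Int × Int => decide (b.1 ≤ a.1))
    (fun a b c h1 h2 => by simp only [decide_eq_true_eq] at *; omega)
    (fun a b => by simp only [Bool.or_eq_true, decide_eq_true_eq]; omega)
    ((PySem.Dict.counter valid).items)
  have hnk : ((PySem.Dict.counter valid).items.map (·.1)).Nodup := by
    have := PySem.Dict.nodup_keys_counter valid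
    simpa [PySem.Dict.keys] using this
  have hnodup : ((pvCoins valid).map (·.1)).Nodup := by
    exact (((pvCoins_perm valid).map (·.1)).nodup_iff).mpr hnk
  have hne : (pvCoins valid).Pairwise (fun a b => a.1 ≠ b.1) := by
    simpa [List.Nodup, List.pairwise_map] using hnodup
  refine ((hle.and hne).imp ?_)
  intro a b hab
  simp only [decide_eq_true_eq] at hab
  omega

theorem pv_sum_filter {α : Type} (p : α → Bool) (Q : α → Prop) [DecidablePred Q] (g : α → Int) :
    ∀ l : List α,
      (l.map (fun x => if p x = true ∧ Q x then g x else 0)).sum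
        = ((l.filter p).map (fun x => if Q x then g x else 0)).sum := by
  intro l
  induction l with
  | nil => simp
  | cons x l IH =>
    by_cases hp : p x = true
    · by_cases hq : Q x
      · simp [hp, hq, IH]
      · simp [hp, hq, IH]
    · simp [hp, IH]

-- grouping: the foldl over `valid` in pvW is the sum over the (filtered) distinct-coin list
theorem pvW_expand (valid : List Int) (t : Nat) (L : Int) (ht : t ≠ 0) (_hok : pvLastOK valid L) :
    pvW valid t L
      = (((pvCoins valid).filter (fun p => p.1 ≤ L)).map
          (fun p => if 1 ≤ p.1 ∧ p.1.toNat ≤ t then p.2 * pvW valid (t - p.1.toNat) p.1 else 0)).sum := by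
  rw [pvW_succ valid t L ht, pv_foldl_if_add, zero_add]
  rw [← pv_sum_over_nodup
        (fun i => if 1 ≤ i ∧ i ≤ (t : Int) ∧ i ≤ L then pvW valid (t - i.toNat) i else 0)
        (PySem.Set.ofList valid) valid (PySem.Set.nodup_ofList valid)
        (fun i hi => (PySem.Set.mem_ofList valid i).mpr hi)]
  have hrhs : (((pvCoins valid).filter (fun p => p.1 ≤ L)).map
        (fun p => if 1 ≤ p.1 ∧ p.1.toNat ≤ t then p.2 * pvW valid (t - p.1.toNat) p.1 else 0)).sum
      = ((pvCoins valid).map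
        (fun p => if (decide (p.1 ≤ L)) = true ∧ (1 ≤ p.1 ∧ p.1.toNat ≤ t)
            then p.2 * pvW valid (t - p.1.toNat) p.1 else 0)).sum :=
    (pv_sum_filter (fun p => decide (p.1 ≤ L)) _ _ (pvCoins valid)).symm
  rw [hrhs]
  rw [((pvCoins_perm valid).map _).sum_eq]
  rw [PySem.Dict.items_counter, List.map_map]
  congr 1
  apply List.map_congr_left
  intro k _
  simp only [Function.comp]
  rw [if_congr (show (1 ≤ k ∧ k ≤ (t : Int) ∧ k ≤ L)
        ↔ ((decide (k ≤ L)) = true ∧ (1 ≤ k ∧ k.toNat ≤ t)) by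
      simp only [decide_eq_true_eq]; omega) rfl rfl]
  simp [mul_ite]

-- structure of a filter of a descending, distinct-coin list
theorem pv_filter_desc {es : List (Int × Int)} (hs : es.Pairwise (fun a b => b.1 < a.1))
    {L : Int} {q : Int × Int} {rest : List (Int × Int)}
    (h : es.filter (fun p => p.1 ≤ L) = q :: rest) :
    q.1 ≤ L ∧ rest = es.filter (fun p => p.1 ≤ q.1 - 1)
      ∧ q :: rest = es.filter (fun p => p.1 ≤ q.1) := by
  induction es with
  | nil => simp at h
  | cons e es IH =>
    have hhead : ∀ b ∈ es, b.1 < e.1 := (List.pairwise_cons.mp hs).1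
    have hpw : es.Pairwise (fun a b => b.1 < a.1) := (List.pairwise_cons.mp hs).2
    by_cases he : e.1 ≤ L
    · rw [List.filter_cons_of_pos (by simpa using he)] at h
      injection h with h1 h2
      subst h1
      have hall : es.filter (fun p => decide (p.1 ≤ L)) = es :=
        List.filter_eq_self.mpr (fun b hb => by
          simp only [decide_eq_true_eq]; have := hhead b hb; omega)
      have hall1 : es.filter (fun p => decide (p.1 ≤ e.1 - 1)) = es :=
        List.filter_eq_self.mpr (fun b hb => by
          simp only [decide_eq_true_eq]; have := hhead b hb; omega)
      have hall2 : es.filter (fun p => decide (p.1 ≤ e.1)) = es :=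
        List.filter_eq_self.mpr (fun b hb => by
          simp only [decide_eq_true_eq]; have := hhead b hb; omega)
      refine ⟨he, ?_, ?_⟩
      · rw [List.filter_cons_of_neg (by simp only [decide_eq_true_eq]; omega)]
        rw [hall1, ← h2, hall]
      · rw [List.filter_cons_of_pos (by simp), hall2, ← h2, hall]
    · rw [List.filter_cons_of_neg (by simpa using he)] at h
      obtain ⟨h1, h2, h3⟩ := IH hpw h
      have hqmem : q ∈ es := List.mem_of_mem_filter (h ▸ List.mem_cons_self)
      have hqe : q.1 < e.1 := hhead q hqmem
      refine ⟨h1, ?_, ?_⟩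
      · rw [List.filter_cons_of_neg (by simp only [decide_eq_true_eq]; omega)]; exact h2
      · rw [List.filter_cons_of_neg (by simp only [decide_eq_true_eq]; omega)]; exact h3

-- MAIN: the last-bounded recursion equals the knapsack count over the allowed coin list
theorem pvW_eq_pvM (valid : List Int) :
    ∀ (t : Nat) (L : Int), pvLastOK valid L →
      pvW valid t L = pvM ((pvCoins valid).filter (fun p => p.1 ≤ L)) t := by
  intro t
  induction t using Nat.strong_induction_on with
  | _ t IHt =>
    suffices H : ∀ (n : Nat) (L : Int), pvLastOK valid L →
        ((pvCoins valid).filter (fun p => p.1 ≤ L)).length ≤ n →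
        pvW valid t L = pvM ((pvCoins valid).filter (fun p => p.1 ≤ L)) t by
      intro L hok; exact H _ L hok le_rfl
    intro n
    induction n with
    | zero =>
      intro L hok hlen
      have hnil : (pvCoins valid).filter (fun p => p.1 ≤ L) = [] := by
        cases hx : (pvCoins valid).filter (fun p => p.1 ≤ L) with
        | nil => rfl
        | cons a b => rw [hx] at hlen; simp at hlen
      rw [hnil]
      by_cases ht : t = 0
      · subst ht; simp [pvW, pvWf, pvM]
      · rw [pvW_expand valid t L ht hok, hnil]; simp [pvM, ht]
    | succ n IHn =>
      intro L hok hlen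
      by_cases ht : t = 0
      · subst ht; rw [pvM_zero]; simp [pvW, pvWf]
      · cases hfe : (pvCoins valid).filter (fun p => p.1 ≤ L) with
        | nil => rw [pvW_expand valid t L ht hok, hfe]; simp [pvM, ht]
        | cons q rest =>
          obtain ⟨hqL, hrest, hq1⟩ := pv_filter_desc (pvCoins_sorted valid) hfe
          obtain ⟨c, m⟩ := q
          have hqmem : (c, m) ∈ pvCoins valid :=
            List.mem_of_mem_filter (by rw [hfe]; exact List.mem_cons_self)
          have hcv : c ∈ valid := (pvCoins_mem hqmem).1
          have hc1 : (1 : Int) ≤ c := hok c hcv hqL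
          have hokc1 : pvLastOK valid (c - 1) := fun i hi hile => hok i hi (by omega)
          have hokc : pvLastOK valid c := fun i hi hile => hok i hi (le_trans hile hqL)
          have hlen' : ((pvCoins valid).filter (fun p => p.1 ≤ c - 1)).length ≤ n := by
            rw [← hrest]
            have := congrArg List.length hfe
            simp only [List.length_cons] at this hlen
            omega
          rw [pvW_expand valid t L ht hok, hfe, List.map_cons, List.sum_cons]
          have hsumrest : (rest.map
              (fun p => if 1 ≤ p.1 ∧ p.1.toNat ≤ t then p.2 * pvW valid (t - p.1.toNat) p.1 else 0)).sum
              = pvW valid t (c - 1) := by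
            rw [hrest, ← pvW_expand valid t (c - 1) ht hokc1]
          rw [hsumrest, pvM_cons]
          have hmr : pvM rest t = pvW valid t (c - 1) := by
            rw [hrest, ← IHn (c - 1) hokc1 hlen']
          rw [hmr]
          by_cases hg : 1 ≤ c ∧ c.toNat ≤ t
          · simp only [if_pos hg]
            have hrec : pvM ((c, m) :: rest) (t - c.toNat) = pvW valid (t - c.toNat) c := by
              rw [hq1, ← IHt (t - c.toNat) (by omega) c hokc]
            rw [hrec, add_comm]
          · simp only [if_neg hg]
            omega

-- ===== B side: the DP fold computes pvM =====

theorem pv_fold_len (c m : Int) : ∀ (l : List Int) (xs : List Int),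
    (l.foldl (fun dp t => PySem.List.pySetD dp t
      (PySem.List.pyGetD dp t 0 + m * PySem.List.pyGetD dp (t - c) 0)) xs).length = xs.length := by
  intro l
  induction l with
  | nil => intro xs; rfl
  | cons x l IH => intro xs; simp only [List.foldl_cons]; rw [IH, PySem.List.length_pySetD]

theorem pv_dp_step (n : Nat) (c m : Int) (es : List (Int × Int)) (hc : 1 ≤ c) :
    ∀ (a : Int), c ≤ a → ∀ (dp : List Int), dp.length = n + 1 →
      (∀ t : Nat, t ≤ n → PySem.List.pyGetD dp (t : Int) 0
        = if (t : Int) < a then pvM ((c, m) :: es) t else pvM es t) →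
      ∀ t : Nat, t ≤ n →
        PySem.List.pyGetD
          ((PySem.List.pyRange a ((n : Int) + 1)).foldl
            (fun dp t =>
              PySem.List.pySetD dp t
                (PySem.List.pyGetD dp t 0 + m * PySem.List.pyGetD dp (t - c) 0)) dp) (t : Int) 0
          = pvM ((c, m) :: es) t := by
  have main : ∀ (k : Nat) (a : Int), (((n : Int) + 1 - a).toNat ≤ k) → c ≤ a →
      ∀ (dp : List Int), dp.length = n + 1 →
      (∀ t : Nat, t ≤ n → PySem.List.pyGetD dp (t : Int) 0
        = if (t : Int) < a then pvM ((c, m) :: es) t else pvM es t) →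
      ∀ t : Nat, t ≤ n →
        PySem.List.pyGetD
          ((PySem.List.pyRange a ((n : Int) + 1)).foldl
            (fun dp t =>
              PySem.List.pySetD dp t
                (PySem.List.pyGetD dp t 0 + m * PySem.List.pyGetD dp (t - c) 0)) dp) (t : Int) 0
          = pvM ((c, m) :: es) t := by
    intro k
    induction k with
    | zero =>
      intro a hk hca dp hlen hinv t htn
      rw [PySem.List.pyRange_one_eq_nil (by omega)]
      simp only [List.foldl_nil]
      rw [hinv t htn, if_pos (by omega)]
    | succ k IHk =>
      intro a hk hca dp hlen hinv t htn
      by_cases hge : (n : Int) + 1 ≤ a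
      · rw [PySem.List.pyRange_one_eq_nil hge]
        simp only [List.foldl_nil]
        rw [hinv t htn, if_pos (by omega)]
      · rw [PySem.List.pyRange_one_cons (by omega)]
        simp only [List.foldl_cons]
        refine IHk (a + 1) (by omega) (by omega) _ ?_ ?_ t htn
        · rw [PySem.List.length_pySetD]; exact hlen
        · intro s hsn
          have ha0 : (0 : Int) ≤ a := by omega
          have han : a.toNat < dp.length := by rw [hlen]; omega
          have hacast : ((a.toNat : Nat) : Int) = a := Int.toNat_of_nonneg ha0
          rw [show a = ((a.toNat : Nat) : Int) from hacast.symm,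
            PySem.List.pyGetD_pySetD_natCast dp a.toNat s _ 0 han]
          by_cases hsa : s = a.toNat
          · rw [if_pos hsa, if_pos (by omega)]
            have h1 : PySem.List.pyGetD dp ((a.toNat : Nat) : Int) 0 = pvM es a.toNat := by
              rw [hinv a.toNat (by omega), if_neg (by omega)]
            have h2 : PySem.List.pyGetD dp (((a.toNat : Nat) : Int) - c) 0
                = pvM ((c, m) :: es) (a.toNat - c.toNat) := by
              rw [show ((a.toNat : Nat) : Int) - c = ((a.toNat - c.toNat : Nat) : Int) by omega,
                hinv (a.toNat - c.toNat) (by omega), if_pos (by omega)]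
            rw [h1, h2, hsa]
            rw [pvM_cons c m es a.toNat, if_pos ⟨hc, by omega⟩]
          · rw [if_neg hsa, hinv s hsn]
            exact if_congr (by omega) rfl rfl
  intro a hca dp hlen hinv t htn
  exact main ((n + 1 - a).toNat) a (by omega) hca dp hlen hinv t htn

theorem pv_dp_fold (n : Nat) :
    ∀ (ps : List (Int × Int)), (∀ p ∈ ps, 1 ≤ p.1) →
      ∀ (dp : List Int) (es : List (Int × Int)), dp.length = n + 1 →
      (∀ t : Nat, t ≤ n → PySem.List.pyGetD dp (t : Int) 0 = pvM es t) →
      ∀ t : Nat, t ≤ n →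
        PySem.List.pyGetD
          (ps.foldl
            (fun dp p =>
              (PySem.List.pyRange p.1 ((n : Int) + 1)).foldl
                (fun dp t =>
                  PySem.List.pySetD dp t
                    (PySem.List.pyGetD dp t 0 + p.2 * PySem.List.pyGetD dp (t - p.1) 0)) dp) dp)
          (t : Int) 0
          = pvM (ps.reverse ++ es) t := by
  intro ps
  induction ps with
  | nil =>
    intro _ dp es hlen hinv t ht
    simpa using hinv t ht
  | cons p ps IH =>
    intro hpos dp es hlen hinv t ht
    obtain ⟨c, m⟩ := p
    have hc : (1 : Int) ≤ c := hpos (c, m) List.mem_cons_self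
    simp only [List.foldl_cons]
    have hstep := pv_dp_step n c m es hc c le_rfl dp hlen (by
      intro s hs
      rw [hinv s hs]
      by_cases hlt : (s : Int) < c
      · rw [if_pos hlt, pvM_cons c m es s, if_neg (by omega)]
        simp
      · rw [if_neg hlt])
    have hlen' := pv_fold_len c m (PySem.List.pyRange c ((n : Int) + 1)) dp
    rw [List.reverse_cons, List.append_assoc, List.singleton_append]
    exact IH (fun q hq => hpos q (List.mem_cons_of_mem _ hq)) _ ((c, m) :: es)
      (by rw [hlen']; exact hlen) hstep t ht

-- ===== A side: the memoized recursion computes pvW =====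

def pvInv (valid : List Int) (T L0 : Int) (d : PySem.Dict (Int × Int) Int) : Prop :=
  ∀ t l v, d.get? (t, l) = some v → 1 ≤ t → t ≤ T →
    (l = L0 ∨ (l ∈ valid ∧ l ≤ L0)) → v = pvW valid t.toNat l

theorem pvAFuel_resolve_pre (valid : List Int) (f : Nat) (t : Int)
    (d : PySem.Dict (Int × Int) Int) (last : Int)
    (hid : pvResolve valid (pvResolve valid last) = pvResolve valid last) :
    pvAFuel valid (f+1) t d last = pvAFuel valid (f+1) t d (pvResolve valid last) := by
  simp only [pvAFuel, hid]

theorem pvResolve_idem (valid : List Int) (last : Int) :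
    pvResolve valid (pvResolve valid last) = pvResolve valid last := by
  unfold pvResolve
  by_cases h : last = -1
  · by_cases h2 : ((PySem.List.max? valid (fun x => x)).getD 0) = -1 <;> simp [h, h2]
  · by_cases h2 : last = -1 <;> simp [h, h2]

theorem pvAFuel_correct (valid : List Int) (T L0 : Int) :
    ∀ (f : Nat) (t L : Int) (d : PySem.Dict (Int × Int) Int),
      0 ≤ t → t.toNat < f → t ≤ T → pvResolve valid L = L → pvLastOK valid L →
      L ≤ L0 → (L = L0 ∨ L ∈ valid) → pvInv valid T L0 d →
      (pvAFuel valid f t d L).1 = pvW valid t.toNat L ∧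
        pvInv valid T L0 (pvAFuel valid f t d L).2 := by
  intro f
  induction f with
  | zero => intro t L d h0 hf; omega
  | succ f IH =>
    intro t L d h0 hf hT hres hok hL0 hLK hinv
    simp only [pvAFuel, hres]
    by_cases ht0 : t = 0
    · simp only [if_pos ht0]
      exact ⟨by simp [ht0, pvW, pvWf], hinv⟩
    · simp only [if_neg ht0]
      have ht1 : (1 : Int) ≤ t := by omega
      cases hm : d.get? (t, L) with
      | some v =>
        simp only []
        refine ⟨hinv t L v hm ht1 hT ?_, hinv⟩
        rcases hLK with h | h
        · exact Or.inl h
        · exact Or.inr ⟨h, hL0⟩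
      | none =>
        simp only []
        have hS := IH (t - 1) L d (by omega) (by omega) (by omega) hres hok hL0 hLK hinv
        have hloop : ∀ (l : List Int), (∀ i ∈ l, i ∈ valid) →
            ∀ (acc : Int × PySem.Dict (Int × Int) Int), pvInv valid T L0 acc.2 →
            (l.foldl (fun acc i => if i ≤ t ∧ i ≤ L then
                (acc.1 + (pvAFuel valid f (t - i) acc.2 i).1, (pvAFuel valid f (t - i) acc.2 i).2)
              else acc) acc).1
              = l.foldl (fun h i => if 1 ≤ i ∧ i ≤ t ∧ i ≤ L
                  then h + pvW valid (t - i).toNat i else h) acc.1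
            ∧ pvInv valid T L0
              (l.foldl (fun acc i => if i ≤ t ∧ i ≤ L then
                (acc.1 + (pvAFuel valid f (t - i) acc.2 i).1, (pvAFuel valid f (t - i) acc.2 i).2)
              else acc) acc).2 := by
          intro l
          induction l with
          | nil => intro _ acc hacc; exact ⟨rfl, hacc⟩
          | cons i l IHl =>
            intro hmem acc hacc
            simp only [List.foldl_cons]
            have hiv : i ∈ valid := hmem i List.mem_cons_self
            by_cases hcond : i ≤ t ∧ i ≤ L
            · have hi1 : (1 : Int) ≤ i := hok i hiv hcond.2
              have hrec := IH (t - i) i acc.2 (by omega) (by omega) (by omega)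
                (by unfold pvResolve; rw [if_neg (by omega)])
                (fun j hj hle => hok j hj (by omega))
                (by omega) (Or.inr hiv) hacc
              simp only [if_pos hcond, if_pos (show 1 ≤ i ∧ i ≤ t ∧ i ≤ L from ⟨hi1, hcond.1, hcond.2⟩)]
              rw [← hrec.1]
              exact IHl (fun j hj => hmem j (List.mem_cons_of_mem _ hj))
                (acc.1 + (pvAFuel valid f (t - i) acc.2 i).1, (pvAFuel valid f (t - i) acc.2 i).2)
                hrec.2
            · have hcond' : ¬ (1 ≤ i ∧ i ≤ t ∧ i ≤ L) := by tauto
              simp only [if_neg hcond, if_neg hcond']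
              exact IHl (fun j hj => hmem j (List.mem_cons_of_mem _ hj)) acc hacc
        have hfin := hloop valid (fun i hi => hi) (0, (pvAFuel valid f (t - 1) d L).2) hS.2
        have hval : (valid.foldl (fun acc i => if i ≤ t ∧ i ≤ L then
                (acc.1 + (pvAFuel valid f (t - i) acc.2 i).1, (pvAFuel valid f (t - i) acc.2 i).2)
              else acc) (0, (pvAFuel valid f (t - 1) d L).2)).1 = pvW valid t.toNat L := by
          rw [hfin.1, pvW_succ valid t.toNat L (by omega)]
          apply PySem.List.foldl_congr_mem
          intro acc x _
          by_cases hC : 1 ≤ x ∧ x ≤ t ∧ x ≤ L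
          · rw [if_pos hC, if_pos (show 1 ≤ x ∧ x ≤ ((t.toNat : Nat) : Int) ∧ x ≤ L by
              refine ⟨hC.1, ?_, hC.2.2⟩; omega)]
            have : (t - x).toNat = t.toNat - x.toNat := by omega
            rw [this]
          · rw [if_neg hC, if_neg (show ¬ (1 ≤ x ∧ x ≤ ((t.toNat : Nat) : Int) ∧ x ≤ L) by omega)]
        refine ⟨hval, ?_⟩
        intro t' l' v hget h1 h2 hK
        by_cases hk : ((t', l') : Int × Int) = (t, L)
        · have ht' : t' = t := congrArg Prod.fst hk
          have hl' : l' = L := congrArg Prod.snd hk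
          subst ht'; subst hl'
          rw [PySem.Dict.get?_insert_self] at hget
          injection hget with hv
          rw [← hv]
          exact hval
        · rw [PySem.Dict.get?_insert_of_ne _ _ hk] at hget
          exact hfin.2 t' l' v hget h1 h2 hK

-- ===== VERDICT (by name: the statement is the Claim_ definition above) =====
theorem howmanyways_spec : Claim_equal_howmanyways := by
  intro total valid things last _ hpre
  obtain ⟨h0, hne, hrest⟩ := hpre
  show howmanyways total valid things last = howmanyways_alt total valid things last
  by_cases ht0 : total = 0
  · subst ht0
    simp [howmanyways, howmanyways_alt, pvAFuel]
  · have hpos : (1 : Int) ≤ total := by omega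
    obtain ⟨hva, hth⟩ := hrest hpos
    have hok : pvLastOK valid (pvResolve valid last) := by
      intro i hi hle
      rcases hva i hi with h | h
      · exact h
      · omega
    -- A side: the memoized recursion computes pvW
    have hinv0 : pvInv valid total (pvResolve valid last)
        (things.foldl (fun d e => d.insert (e.1, e.2.1) e.2.2)
          (PySem.Dict.empty : PySem.Dict (Int × Int) Int)) := by
      intro t' l' v hget h1 h2 hK
      exfalso
      have hkeys : ((t', l') : Int × Int) ∈
          (things.foldl (fun d e => d.insert (e.1, e.2.1) e.2.2)
            (PySem.Dict.empty : PySem.Dict (Int × Int) Int)).keys := by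
        by_contra hni
        rw [(PySem.Dict.get?_eq_none_iff_not_mem_keys _ _).mpr hni] at hget
        simp at hget
      rw [PySem.Dict.keys_foldl_insert_key things (fun e => (e.1, e.2.1))
        (fun _ e => e.2.2) PySem.Dict.empty] at hkeys
      rw [PySem.Dict.keys_empty] at hkeys
      have hmem := (PySem.Set.mem_update _ _ _).mp hkeys
      simp only [List.not_mem_nil, false_or] at hmem
      obtain ⟨e, he, heq⟩ := List.mem_map.mp hmem
      have he1 : e.1 = t' := congrArg Prod.fst heq
      have he2 : e.2.1 = l' := congrArg Prod.snd heq
      obtain ⟨hne', hval'⟩ := hth e he (by omega) (by omega)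
      rcases hK with h | ⟨hv1, hv2⟩
      · exact hne' (by rw [he2, h])
      · have := hval' (he2 ▸ hv1)
        omega
    have hA := pvAFuel_correct valid total (pvResolve valid last) (total.toNat + 1) total
      (pvResolve valid last)
      (things.foldl (fun d e => d.insert (e.1, e.2.1) e.2.2) PySem.Dict.empty)
      h0 (by omega) le_rfl (pvResolve_idem valid last) hok le_rfl (Or.inl rfl) hinv0
    have hAval : howmanyways total valid things last
        = pvW valid total.toNat (pvResolve valid last) := by
      simp only [howmanyways]
      rw [pvAFuel_resolve_pre valid total.toNat total _ last (pvResolve_idem valid last)]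
      exact hA.1
    -- B side: the DP computes pvM, hence pvW
    have hn1 : ((total.toNat : Nat) : Int) = total := Int.toNat_of_nonneg h0
    have hpos_ps : ∀ p : Int × Int, p ∈ (PySem.Dict.counter valid).items.filter
        (fun p => p.1 ≤ pvResolve valid last) → (1 : Int) ≤ p.1 := by
      intro p hp
      have hm := List.mem_of_mem_filter hp
      have hcond : p.1 ≤ pvResolve valid last := by
        simpa using List.of_mem_filter hp
      have hk : p.1 ∈ (PySem.Dict.counter valid).keys :=
        PySem.Dict.mem_keys_of_mem_items _ hm
      rw [PySem.Dict.keys_counter] at hk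
      exact hok p.1 ((PySem.Set.mem_ofList valid p.1).mp hk) hcond
    have hdp0 : ∀ t : Nat, t ≤ total.toNat →
        PySem.List.pyGetD (1 :: List.replicate total.toNat 0) (t : Int) 0 = pvM [] t := by
      intro t htn
      rw [PySem.List.pyGetD_of_nonneg _ _ (by omega)]
      cases t with
      | zero => simp [pvM]
      | succ t =>
        simp only [Int.toNat_natCast, List.getD_cons_succ, pvM]
        simp only [List.getD_eq_getElem?_getD, List.getElem?_replicate]
        split <;> rfl
    have hB := pv_dp_fold total.toNat
      ((PySem.Dict.counter valid).items.filter
        (fun p : Int × Int => p.1 ≤ pvResolve valid last))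
      hpos_ps (1 :: List.replicate total.toNat 0) [] (by simp) hdp0 total.toNat le_rfl
    have hperm : ((((PySem.Dict.counter valid).items.filter
          (fun p : Int × Int => p.1 ≤ pvResolve valid last)).reverse ++ [])).Perm
        ((pvCoins valid).filter (fun p : Int × Int => p.1 ≤ pvResolve valid last)) := by
      rw [List.append_nil]
      exact (List.reverse_perm _).trans (List.Perm.filter _ (pvCoins_perm valid).symm)
    have hBval : howmanyways_alt total valid things last
        = pvW valid total.toNat (pvResolve valid last) := by
      simp only [howmanyways_alt, if_neg ht0]
      rw [PySem.Dict.foldl_insert_getD_add_one_eq_counter]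
      have hff : ∀ (l : List (Int × Int)) (init : List Int),
          l.foldl (fun dp p => if p.1 ≤ pvResolve valid last then
              (PySem.List.pyRange p.1 (total + 1)).foldl
                (fun dp t => PySem.List.pySetD dp t
                  (PySem.List.pyGetD dp t 0 + p.2 * PySem.List.pyGetD dp (t - p.1) 0)) dp
            else dp) init
          = (l.filter (fun p => p.1 ≤ pvResolve valid last)).foldl
              (fun dp p => (PySem.List.pyRange p.1 (total + 1)).foldl
                (fun dp t => PySem.List.pySetD dp t
                  (PySem.List.pyGetD dp t 0 + p.2 * PySem.List.pyGetD dp (t - p.1) 0)) dp) init := by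
        intro l
        induction l with
        | nil => intro init; rfl
        | cons p l IH =>
          intro init
          by_cases hc : p.1 ≤ pvResolve valid last
          · rw [List.foldl_cons, List.filter_cons_of_pos (by simpa using hc), if_pos hc,
              List.foldl_cons, IH]
          · rw [List.foldl_cons, List.filter_cons_of_neg (by simpa using hc), if_neg hc, IH]
      rw [hn1] at hB
      rw [hff, hB, pvM_perm hperm, ← pvW_eq_pvM valid total.toNat (pvResolve valid last) hok]
    rw [hAval, hBval]
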